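-- pv_equiv track=rewrite | github.com/edt-yxz-zzd/python3_src | nn_ns/algo/sep_str.py | match_FA_def
-- ===== SOURCE A (Python) =====
-- def match_FA_def(s):
--     assert len(s) > 0
--     fa = [{s[0]:1}]
--     for i in range(1,len(s)):
--         jump = {}
--         suffix_list = ([s[j:i] for j in range(i)] + [s[0:1]])
--         suffix_list.sort()
--         beg = suffix_list.index(s[0:1])
--         this = suffix_list.index(s[:i], beg+1)
--         suffix_list = [s[0:0]] + suffix_list[beg+1:this+1]
--
--         for sj in suffix_list:
--             L = len(sj)
--             if sj == s[:L]:
--                 jump[s[L]] = L+1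
--         fa.append(jump)
--     return tuple(fa)
-- ===== SOURCE B (Python) =====
-- def match_FA_def(s):
--     assert len(s) > 0
--     fa = []
--     for i in range(len(s)):
--         jump = {}
--         for L in range(i + 1):
--             if L == 0 or s[:L] == s[i - L:i]:
--                 jump[s[L]] = L + 1
--         fa.append(jump)
--     return tuple(fa)
-- ===== Notes on version B (the rewrite author's own statement) =====
-- stated objective: simpler
-- what changed: A builds, sorts and index-slices the list of all suffixes of s[:i] for every state i to locate the border suffixes; B drops the suffix list and the sort/index/slice machinery entirely and emits a transition for each length L with s[:L] == s[i-L:i] (a direct border test), in one plain double loop.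
import Mathlib
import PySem

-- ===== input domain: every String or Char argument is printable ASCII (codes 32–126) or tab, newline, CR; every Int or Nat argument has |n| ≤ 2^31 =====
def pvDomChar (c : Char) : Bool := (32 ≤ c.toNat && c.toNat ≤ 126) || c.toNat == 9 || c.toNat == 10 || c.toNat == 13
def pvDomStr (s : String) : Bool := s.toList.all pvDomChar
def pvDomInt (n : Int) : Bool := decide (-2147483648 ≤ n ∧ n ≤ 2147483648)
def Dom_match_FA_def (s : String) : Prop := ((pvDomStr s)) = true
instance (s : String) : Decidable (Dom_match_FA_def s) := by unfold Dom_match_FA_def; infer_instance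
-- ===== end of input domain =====

-- B replaces A's per-state sort/index/slice machinery over all suffixes by a direct
-- border test (prefix = suffix) per length: simpler, no sorting.  Equivalence of the
-- RETURN value is proved for every non-empty string (A asserts the input is non-empty).

-- ===== PORT A =====
-- inner 'for sj in suffix_list' loop of A
def matchFAJumpA (cs : List Char) (sliced : List (List Char)) : PySem.Dict String Int :=
  sliced.foldl (fun jump sj =>
    if sj = PySem.List.slice cs none (some (sj.length : Int)) then  -- sj == s[:L]
      match PySem.List.pyGet? cs (sj.length : Int) with             -- s[L]
      | some c => jump.insert (String.mk [c]) ((sj.length : Int) + 1)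
      | none => jump   -- IndexError: unreachable here (L ≤ i < len(s))
    else jump) PySem.Dict.empty

-- body of A's 'for i in range(1, len(s))' loop (building one 'jump' dict)
def matchFAStateA (cs : List Char) (i : Int) : PySem.Dict String Int :=
  let suffixList := ((PySem.List.pyRange 0 i 1).map
      (fun j => PySem.List.slice cs (some j) (some i)))             -- [s[j:i] for j in range(i)]
    ++ [PySem.List.slice cs (some 0) (some 1)]                      -- + [s[0:1]]
  let sl := PySem.List.sorted suffixList (fun t => t) false         -- suffix_list.sort()
  let beg := (PySem.List.index? sl (PySem.List.slice cs (some 0) (some 1))).getD 0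
      -- suffix_list.index(s[0:1]); always found (s[0:1] is in the list)
  let this := beg + 1 +
      (PySem.List.index? (sl.drop (beg + 1)) (PySem.List.slice cs none (some i))).getD 0
      -- suffix_list.index(s[:i], beg+1); always found for non-empty s
  matchFAJumpA cs
    (([] : List Char) :: PySem.List.slice sl (some ((beg : Int) + 1)) (some ((this : Int) + 1)))
      -- [s[0:0]] + suffix_list[beg+1:this+1]

def match_FA_def (s : String) : List (List (String × Int)) :=
  let cs := s.toList
  if cs.length = 0 then []       -- A's opening assertion fails here: excluded by Pre_
  else
    (((PySem.List.pyRange 1 (cs.length : Int) 1).foldl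
        (fun fa i => fa ++ [matchFAStateA cs i])
        [PySem.Dict.empty.insert (String.mk [s.toList.headI]) 1]).map  -- fa = [{s[0]: 1}]
      (fun d => d.items))

-- ===== PORT B =====
-- body of B's 'for i in range(len(s))' loop
def matchFAStateB (cs : List Char) (i : Int) : PySem.Dict String Int :=
  (PySem.List.pyRange 0 (i + 1) 1).foldl (fun jump L =>
    if L = 0 ∨ PySem.List.slice cs none (some L) = PySem.List.slice cs (some (i - L)) (some i)
    then                                                            -- L == 0 or s[:L] == s[i-L:i]
      match PySem.List.pyGet? cs L with                             -- s[L]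
      | some c => jump.insert (String.mk [c]) (L + 1)
      | none => jump   -- IndexError: unreachable here (L ≤ i < len(s))
    else jump) PySem.Dict.empty

def match_FA_def_alt (s : String) : List (List (String × Int)) :=
  let cs := s.toList
  if cs.length = 0 then []       -- assert fails
  else
    (((PySem.List.pyRange 0 (cs.length : Int) 1).foldl
        (fun fa i => fa ++ [matchFAStateB cs i]) []).map (fun d => d.items))

-- ===== PRECONDITION & SPEC =====
-- Pre_ excludes only the empty string, on which A's opening assertion raises AssertionError.
def Pre_match_FA_def (s : String) : Prop := s ≠ ""
instance (s : String) : Decidable (Pre_match_FA_def s) := by unfold Pre_match_FA_def; infer_instance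
def pvWitness_match_FA_def : String := "aab"
def Spec_match_FA_def (s : String) (out : List (List (String × Int))) : Prop := out = match_FA_def_alt s
instance (s : String) (out : List (List (String × Int))) : Decidable (Spec_match_FA_def s out) := by unfold Spec_match_FA_def; infer_instance

-- ===== CLAIM (what is proved, stated in full; the proofs are below) =====
def Claim_equal_match_FA_def : Prop := ∀ (s : String), Dom_match_FA_def s → Pre_match_FA_def s → Spec_match_FA_def s (match_FA_def s)

-- ===== LEMMAS AND PROOFS =====

-- proof-only helpers: the common value both per-state loops compute
def pvStep (cs : List Char) (jump : PySem.Dict String Int) (L : Nat) : PySem.Dict String Int :=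
  match cs[L]? with
  | some c => jump.insert (String.mk [c]) ((L : Int) + 1)
  | none => jump

def pvBorder (cs : List Char) (i L : Nat) : Bool := decide (cs.take L = (cs.take i).drop (i - L))
def pvBorders (cs : List Char) (i : Nat) : List Nat := (List.range (i + 1)).filter (pvBorder cs i)
def pvDictC (cs : List Char) (i : Nat) : PySem.Dict String Int :=
  (pvBorders cs i).foldl (pvStep cs) PySem.Dict.empty

-- A-side decomposition of the sorted suffix list
def pvSfx (cs : List Char) (i : Nat) : List (List Char) :=
  (List.range i).map (fun j => (cs.take i).drop j)
def pvXc (cs : List Char) : List Char := cs.take 1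
def pvP (cs : List Char) (i : Nat) : List (List Char) :=
  PySem.List.sorted ((pvSfx cs i).filter (fun t => decide (t < pvXc cs))) (fun t => t) false
def pvX2 (cs : List Char) (i : Nat) : List (List Char) :=
  (pvSfx cs i).filter (fun t => decide (t = pvXc cs))
def pvM (cs : List Char) (i : Nat) : List (List Char) :=
  PySem.List.sorted ((pvSfx cs i).filter (fun t => decide (pvXc cs < t ∧ t < cs.take i))) (fun t => t) false
def pvW2 (cs : List Char) (i : Nat) : List (List Char) :=
  (pvSfx cs i).filter (fun t => decide (t = cs.take i))
def pvQ (cs : List Char) (i : Nat) : List (List Char) :=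
  PySem.List.sorted ((pvSfx cs i).filter (fun t => decide (cs.take i < t))) (fun t => t) false
def pvSL0 (cs : List Char) (i : Nat) : List (List Char) :=
  pvP cs i ++ pvXc cs :: (pvX2 cs i ++ pvM cs i ++ pvW2 cs i ++ pvQ cs i)

-- bridge: the ambient (core) List-order instances and Mathlib's LinearOrder order on
-- List Char are propositionally the same order, so 'sorted' computes the same list
theorem pvSortedBridge (xs : List (List Char)) :
    @PySem.List.sorted (List Char) (List Char) List.instLT (fun a b => a.decidableLT b) xs
      (fun t => t) false
    = @PySem.List.sorted (List Char) (List Char)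
        (@Preorder.toLT _ (@PartialOrder.toPreorder _ (@LinearOrder.toPartialOrder _ inferInstance)))
        (@LinearOrder.toDecidableLT _ inferInstance) xs (fun t => t) false := by
  rw [@PySem.List.sorted_eq_foldl_insertBy (List Char) (List Char) List.instLT
        (fun a b => a.decidableLT b) xs (fun t => t),
      @PySem.List.sorted_eq_foldl_insertBy (List Char) (List Char)
        (@Preorder.toLT _ (@PartialOrder.toPreorder _ (@LinearOrder.toPartialOrder _ inferInstance)))
        (@LinearOrder.toDecidableLT _ inferInstance) xs (fun t => t)]
  congr 1
  funext acc x
  congr 1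
  funext a b
  refine decide_eq_decide.mpr ?_
  constructor
  · intro h; exact (List.lt_iff_lex_lt a b).mp h
  · intro h; exact (List.lt_iff_lex_lt a b).mpr h

theorem pvSortedPairwiseCore (xs : List (List Char)) :
    (@PySem.List.sorted (List Char) (List Char) List.instLT (fun a b => a.decidableLT b) xs
      (fun t => t) false).Pairwise (· ≤ ·) := by
  rw [pvSortedBridge]
  exact PySem.List.sorted_pairwise xs (fun t : List Char => t)

theorem pvSortedEqSelfCore (xs : List (List Char)) (h : xs.Pairwise (· ≤ ·)) :
    @PySem.List.sorted (List Char) (List Char) List.instLT (fun a b => a.decidableLT b) xs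
      (fun t => t) false = xs := by
  rw [pvSortedBridge]
  exact PySem.List.sorted_eq_self_of_pairwise xs (fun t : List Char => t) h

-- generic order facts on List Char
theorem pvLtAppendCons (l : List Char) (c : Char) (t : List Char) : l < l ++ c :: t := by
  induction l with
  | nil => exact List.Lex.nil
  | cons a l ih => exact List.Lex.cons ih

theorem pvPrefixLt {l l' : List Char} (h : l <+: l') (hlen : l.length < l'.length) : l < l' := by
  obtain ⟨t, rfl⟩ := h
  cases t with
  | nil => simp at hlen
  | cons c t => exact pvLtAppendCons l c t

theorem pvTakeLtTake (cs : List Char) {L1 L2 : Nat} (h12 : L1 < L2) (h2 : L2 ≤ cs.length) :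
    cs.take L1 < cs.take L2 := by
  apply pvPrefixLt
  · have : cs.take L1 = (cs.take L2).take L1 := by
      rw [List.take_take]; congr 1; omega
    rw [this]; exact List.take_prefix _ _
  · simp; omega

theorem pvCountFilter (v : List Char) (p : List Char → Bool) (l : List (List Char)) :
    (l.filter p).count v = if p v then l.count v else 0 := by
  induction l with
  | nil => simp
  | cons a l ih =>
    rw [List.filter_cons]
    by_cases hav : a = v
    · subst hav
      by_cases hp : p a
      · simp [hp, List.count_cons, ih]
      · simp [hp, ih]
    · by_cases hp : p a
      · simp [hp, List.count_cons, hav, ih]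
      · simp [hp, List.count_cons, hav, ih]

theorem pvFilterEqSelf (l : List (List Char)) (v : List Char) (hnd : l.Nodup) (hv : v ∈ l) :
    l.filter (fun t => decide (t = v)) = [v] := by
  induction l with
  | nil => cases hv
  | cons a l ih =>
    rw [List.filter_cons]
    rcases List.mem_cons.mp hv with rfl | hv'
    · have hnotin : v ∉ l := (List.nodup_cons.mp hnd).1
      have : l.filter (fun t => decide (t = v)) = [] := by
        rw [List.filter_eq_nil_iff]
        intro t ht
        simp only [decide_eq_true_eq]
        rintro rfl; exact hnotin ht
      simp [this]
    · have hne : a ≠ v := by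
        rintro rfl; exact (List.nodup_cons.mp hnd).1 hv'
      simp only [hne, decide_false]
      exact ih (List.nodup_cons.mp hnd).2 hv'

-- pvSfx basics
theorem pvLenSfxElem (cs : List Char) {i j : Nat} (hj : j < i) (hi : i ≤ cs.length) :
    ((cs.take i).drop j).length = i - j := by simp; omega

theorem pvNodupSfx (cs : List Char) {i : Nat} (hi : i ≤ cs.length) : (pvSfx cs i).Nodup := by
  apply List.Nodup.map_on _ List.nodup_range
  intro j hj j' hj' he
  have h1 : ((cs.take i).drop j).length = i - j :=
    pvLenSfxElem cs (List.mem_range.mp hj) hi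
  have h2 : ((cs.take i).drop j').length = i - j' :=
    pvLenSfxElem cs (List.mem_range.mp hj') hi
  have := List.mem_range.mp hj
  have := List.mem_range.mp hj'
  rw [he] at h1
  omega

theorem pvMemSfxIff (cs : List Char) {i : Nat} (hi : i ≤ cs.length) (a : List Char) :
    a ∈ pvSfx cs i ↔ 1 ≤ a.length ∧ a.length ≤ i ∧ a = (cs.take i).drop (i - a.length) := by
  simp only [pvSfx, List.mem_map, List.mem_range]
  constructor
  · rintro ⟨j, hj, rfl⟩
    have hl := pvLenSfxElem cs hj hi
    refine ⟨by omega, by omega, ?_⟩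
    rw [hl]
    congr 1
    omega
  · rintro ⟨ha1, ha2, he⟩
    exact ⟨i - a.length, by omega, he.symm⟩

theorem pvMemP (cs : List Char) (i : Nat) {a : List Char} (h : a ∈ pvP cs i) :
    a ∈ pvSfx cs i ∧ a < pvXc cs := by
  rw [pvP, PySem.List.mem_sorted, List.mem_filter] at h
  simpa using h

theorem pvMemX2 (cs : List Char) (i : Nat) {a : List Char} (h : a ∈ pvX2 cs i) :
    a ∈ pvSfx cs i ∧ a = pvXc cs := by
  rw [pvX2, List.mem_filter] at h
  simpa using h

theorem pvMemM (cs : List Char) (i : Nat) {a : List Char} (h : a ∈ pvM cs i) :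
    a ∈ pvSfx cs i ∧ pvXc cs < a ∧ a < cs.take i := by
  rw [pvM, PySem.List.mem_sorted, List.mem_filter] at h
  simpa using h

theorem pvMemW2 (cs : List Char) (i : Nat) {a : List Char} (h : a ∈ pvW2 cs i) :
    a ∈ pvSfx cs i ∧ a = cs.take i := by
  rw [pvW2, List.mem_filter] at h
  simpa using h

theorem pvMemQ (cs : List Char) (i : Nat) {a : List Char} (h : a ∈ pvQ cs i) :
    a ∈ pvSfx cs i ∧ cs.take i < a := by
  rw [pvQ, PySem.List.mem_sorted, List.mem_filter] at h
  simpa using h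

theorem pvXLtW (cs : List Char) {i : Nat} (h1 : 2 ≤ i) (h2 : i ≤ cs.length) :
    pvXc cs < cs.take i := by
  apply pvTakeLtTake cs _ h2; omega

-- the sorted suffix list is exactly pvSL0
theorem pvPermSL0 (cs : List Char) {i : Nat} (h1 : 2 ≤ i) (h2 : i ≤ cs.length) :
    (pvSL0 cs i).Perm (pvSfx cs i ++ [pvXc cs]) := by
  have hxw := pvXLtW cs h1 h2
  rw [List.perm_iff_count]
  intro v
  simp only [pvSL0, pvP, pvX2, pvM, pvW2, pvQ, List.count_append, List.count_cons]
  rw [(PySem.List.sorted_perm _ _ _).count_eq, (PySem.List.sorted_perm _ _ _).count_eq,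
      (PySem.List.sorted_perm _ _ _).count_eq]
  rw [pvCountFilter, pvCountFilter, pvCountFilter, pvCountFilter, pvCountFilter]
  rcases lt_trichotomy v (pvXc cs) with hv | hv | hv
  · have hvw : v < cs.take i := hv.trans hxw
    simp [hv, hv.ne, hv.ne', hvw, hvw.ne, hvw.ne', not_lt_of_gt hv, not_lt_of_gt hvw]
  · subst hv
    simp [lt_irrefl, hxw, hxw.ne, not_lt_of_gt hxw]
  · rcases lt_trichotomy v (cs.take i) with hw | hw | hw
    · simp [hv, hw, hv.ne, hv.ne', hw.ne, hw.ne', not_lt_of_gt hv, not_lt_of_gt hw]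
    · subst hw
      simp [hv, hv.ne', lt_irrefl, not_lt_of_gt hv]
    · have hvx : pvXc cs < v := hxw.trans hw
      simp [hv, hw, hvx.ne, hvx.ne', hw.ne, hw.ne', not_lt_of_gt hv, not_lt_of_gt hw,
        not_lt_of_gt hvx]

theorem pvPairwiseSL0 (cs : List Char) {i : Nat} (h1 : 2 ≤ i) (h2 : i ≤ cs.length) :
    (pvSL0 cs i).Pairwise (· ≤ ·) := by
  have hxw := pvXLtW cs h1 h2
  have hgeX : ∀ b ∈ pvXc cs :: (pvX2 cs i ++ pvM cs i ++ pvW2 cs i ++ pvQ cs i),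
      pvXc cs ≤ b := by
    intro b hb
    rcases List.mem_cons.mp hb with rfl | hb
    · exact le_refl _
    · rcases List.mem_append.mp hb with hb | hb
      · rcases List.mem_append.mp hb with hb | hb
        · rcases List.mem_append.mp hb with hb | hb
          · exact le_of_eq (pvMemX2 cs i hb).2.symm
          · exact le_of_lt (pvMemM cs i hb).2.1
        · exact (pvMemW2 cs i hb).2 ▸ le_of_lt hxw
      · exact le_of_lt (hxw.trans (pvMemQ cs i hb).2)
  rw [pvSL0, List.pairwise_append]
  refine ⟨by rw [pvP]; exact pvSortedPairwiseCore _, ?_, ?_⟩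
  · rw [List.pairwise_cons]
    refine ⟨fun b hb => hgeX b (List.mem_cons_of_mem _ hb), ?_⟩
    rw [List.pairwise_append]
    refine ⟨?_, by rw [pvQ]; exact pvSortedPairwiseCore _, ?_⟩
    · rw [List.pairwise_append]
      refine ⟨?_, ?_, ?_⟩
      · rw [List.pairwise_append]
        refine ⟨?_, by rw [pvM]; exact pvSortedPairwiseCore _, ?_⟩
        · exact List.pairwise_of_forall_mem_list (fun a ha b hb =>
            le_of_eq ((pvMemX2 cs i ha).2.trans (pvMemX2 cs i hb).2.symm))
        · exact fun a ha b hb => le_of_lt (((pvMemX2 cs i ha).2) ▸ (pvMemM cs i hb).2.1)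
      · exact List.pairwise_of_forall_mem_list (fun a ha b hb =>
            le_of_eq ((pvMemW2 cs i ha).2.trans (pvMemW2 cs i hb).2.symm))
      · intro a ha b hb
        rw [(pvMemW2 cs i hb).2]
        rcases List.mem_append.mp ha with ha | ha
        · exact le_of_lt (((pvMemX2 cs i ha).2) ▸ hxw)
        · exact le_of_lt (pvMemM cs i ha).2.2
    · intro a ha b hb
      have hwb := (pvMemQ cs i hb).2
      rcases List.mem_append.mp ha with ha | ha
      · rcases List.mem_append.mp ha with ha | ha
        · exact le_of_lt (((pvMemX2 cs i ha).2) ▸ (hxw.trans hwb))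
        · exact le_of_lt ((pvMemM cs i ha).2.2.trans hwb)
      · exact le_of_lt ((pvMemW2 cs i ha).2 ▸ hwb)
  · intro a ha b hb
    exact le_trans (le_of_lt (pvMemP cs i ha).2) (hgeX b hb)

theorem pvSortedEqSL0 (cs : List Char) {i : Nat} (h1 : 2 ≤ i) (h2 : i ≤ cs.length) :
    PySem.List.sorted (pvSfx cs i ++ [pvXc cs]) (fun t => t) false = pvSL0 cs i := by
  refine PySem.List.eq_of_perm_of_pairwise_le_of_injective (κ := List Char)
    (fun t : List Char => t) (fun a b h => h) ?_ ?_ ?_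
  · exact (PySem.List.sorted_perm _ _ _).trans (pvPermSL0 cs h1 h2).symm
  · exact pvSortedPairwiseCore _
  · exact pvPairwiseSL0 cs h1 h2

theorem pvBegSpec (cs : List Char) {i : Nat} (h1 : 2 ≤ i) (h2 : i ≤ cs.length) :
    PySem.List.index? (pvSL0 cs i) (pvXc cs) = some (pvP cs i).length := by
  rw [PySem.List.index?_eq_some_iff]
  refine ⟨pvP cs i, pvX2 cs i ++ pvM cs i ++ pvW2 cs i ++ pvQ cs i, by rw [pvSL0], rfl, ?_⟩
  intro hmem
  exact absurd (pvMemP cs i hmem).2 (lt_irrefl _)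

theorem pvW2Spec (cs : List Char) {i : Nat} (h1 : 1 ≤ i) (h2 : i ≤ cs.length) :
    pvW2 cs i = [cs.take i] := by
  rw [pvW2]
  apply pvFilterEqSelf _ _ (pvNodupSfx cs h2)
  rw [pvMemSfxIff cs h2]
  have hlen : (cs.take i).length = i := by simp [h2]
  refine ⟨by omega, by omega, ?_⟩
  rw [hlen]
  simp

theorem pvDropSpec (cs : List Char) (i : Nat) :
    (pvSL0 cs i).drop ((pvP cs i).length + 1)
      = pvX2 cs i ++ pvM cs i ++ pvW2 cs i ++ pvQ cs i := by
  rw [pvSL0]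
  rw [show pvP cs i ++ pvXc cs :: (pvX2 cs i ++ pvM cs i ++ pvW2 cs i ++ pvQ cs i)
      = (pvP cs i ++ [pvXc cs]) ++ (pvX2 cs i ++ pvM cs i ++ pvW2 cs i ++ pvQ cs i) by simp]
  exact List.drop_left' (by simp)

theorem pvThisSpec (cs : List Char) {i : Nat} (h1 : 2 ≤ i) (h2 : i ≤ cs.length) :
    PySem.List.index? ((pvSL0 cs i).drop ((pvP cs i).length + 1)) (cs.take i)
      = some ((pvX2 cs i).length + (pvM cs i).length) := by
  have hxw := pvXLtW cs h1 h2
  rw [pvDropSpec, pvW2Spec cs (by omega) h2]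
  rw [show pvX2 cs i ++ pvM cs i ++ [cs.take i] ++ pvQ cs i
      = (pvX2 cs i ++ pvM cs i) ++ cs.take i :: pvQ cs i by simp]
  rw [PySem.List.index?_eq_some_iff]
  refine ⟨pvX2 cs i ++ pvM cs i, pvQ cs i, rfl, by simp, ?_⟩
  intro hmem
  rcases List.mem_append.mp hmem with hm | hm
  · exact hxw.ne' (pvMemX2 cs i hm).2
  · exact absurd (pvMemM cs i hm).2.2 (lt_irrefl _)

theorem pvSliceSpec (cs : List Char) {i : Nat} (h1 : 2 ≤ i) (h2 : i ≤ cs.length) :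
    PySem.List.slice (pvSL0 cs i) (some (((pvP cs i).length : Int) + 1))
      (some ((((pvP cs i).length + 1 + ((pvX2 cs i).length + (pvM cs i).length) : Nat) : Int) + 1))
      = pvX2 cs i ++ pvM cs i ++ [cs.take i] := by
  have ha : ((pvP cs i).length : Int) + 1 = (((pvP cs i).length + 1 : Nat) : Int) := by push_cast; ring
  have hb : ((((pvP cs i).length + 1 + ((pvX2 cs i).length + (pvM cs i).length) : Nat)) : Int) + 1
      = ((((pvP cs i).length + 1 + ((pvX2 cs i).length + (pvM cs i).length) + 1 : Nat)) : Int) := by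
    push_cast; ring
  rw [ha, hb, PySem.List.slice_toNat _ (by positivity) (by positivity),
    Int.toNat_natCast, Int.toNat_natCast]
  rw [show (pvP cs i).length + 1 + ((pvX2 cs i).length + (pvM cs i).length) + 1
      - ((pvP cs i).length + 1) = (pvX2 cs i).length + (pvM cs i).length + 1 from by omega]
  rw [pvDropSpec, pvW2Spec cs (by omega) h2]
  rw [List.take_append]
  rw [List.take_of_length_le
    (by simp only [List.length_append, List.length_cons, List.length_nil]; omega)]
  rw [show (pvX2 cs i).length + (pvM cs i).length + 1
      - ((pvX2 cs i ++ pvM cs i ++ [cs.take i]).length) = 0 from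
    by simp only [List.length_append, List.length_cons, List.length_nil]; omega]
  simp

theorem pvMemBorders (cs : List Char) (i L : Nat) :
    L ∈ pvBorders cs i ↔ L ≤ i ∧ cs.take L = (cs.take i).drop (i - L) := by
  simp only [pvBorders, List.mem_filter, List.mem_range, pvBorder, decide_eq_true_eq]
  constructor
  · rintro ⟨hr, hb⟩; exact ⟨by omega, hb⟩
  · rintro ⟨hLi, hb⟩; exact ⟨by omega, hb⟩

-- the prefix-filtered slice is the increasing border-prefix list
theorem pvFilterChar (cs : List Char) {i : Nat} (h1 : 2 ≤ i) (h2 : i < cs.length) :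
    (([] : List Char) :: (pvX2 cs i ++ pvM cs i ++ [cs.take i])).filter
        (fun sj => decide (sj = cs.take sj.length))
      = (pvBorders cs i).map (fun L => cs.take L) := by
  have h2' : i ≤ cs.length := le_of_lt h2
  have hxw := pvXLtW cs h1 h2'
  have hlen : ∀ L, L ≤ i → (cs.take L).length = L := fun L hL => by simp; omega
  have hne : ∀ a, a ∈ pvSfx cs i → a ≠ [] := by
    intro a ha hanil
    have := ((pvMemSfxIff cs h2' a).mp ha).1
    rw [hanil] at this
    simp at this
  have hwlen : (cs.take i).length = i := hlen i (le_refl i)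
  -- membership transfers
  have hmemF : ∀ a, (a ∈ ([] : List Char) :: (pvX2 cs i ++ pvM cs i ++ [cs.take i])
        ∧ a = cs.take a.length) → ∃ L, L ∈ pvBorders cs i ∧ cs.take L = a := by
    rintro a ⟨hmem, hpref⟩
    rcases List.mem_cons.mp hmem with rfl | hmem
    · refine ⟨0, (pvMemBorders cs i 0).mpr ⟨by omega, ?_⟩, by simp⟩
      simp [List.drop_take]
    · rcases List.mem_append.mp hmem with hmem | hmem
      · have hsfx : a ∈ pvSfx cs i := by
          rcases List.mem_append.mp hmem with hm | hm
          · exact (pvMemX2 cs i hm).1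
          · exact (pvMemM cs i hm).1
        obtain ⟨hl1, hl2, he⟩ := (pvMemSfxIff cs h2' a).mp hsfx
        exact ⟨a.length, (pvMemBorders cs i a.length).mpr ⟨hl2, by rw [← hpref]; exact he⟩,
          hpref.symm⟩
      · rw [List.mem_singleton.mp hmem]
        refine ⟨i, (pvMemBorders cs i i).mpr ⟨le_refl i, by simp⟩, rfl⟩
  have hmemB : ∀ L, L ∈ pvBorders cs i →
      (cs.take L ∈ ([] : List Char) :: (pvX2 cs i ++ pvM cs i ++ [cs.take i])
        ∧ cs.take L = cs.take (cs.take L).length) := by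
    intro L hLb
    obtain ⟨hLi, hb⟩ := (pvMemBorders cs i L).mp hLb
    refine ⟨?_, by rw [hlen L hLi]⟩
    by_cases hL0 : L = 0
    · subst hL0; simp
    · by_cases hLi' : L = i
      · subst hLi'
        simp
      · have hLlt : L < i := by omega
        have hsfx : cs.take L ∈ pvSfx cs i := by
          rw [pvMemSfxIff cs h2']
          refine ⟨by rw [hlen L hLi]; omega, by rw [hlen L hLi]; omega, ?_⟩
          rw [hlen L hLi]
          exact hb
        apply List.mem_cons_of_mem
        apply List.mem_append_left
        by_cases hL1 : L = 1
        · subst hL1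
          apply List.mem_append_left
          rw [pvX2, List.mem_filter]
          exact ⟨hsfx, by rw [pvXc]; simp⟩
        · apply List.mem_append_right
          rw [pvM, PySem.List.mem_sorted, List.mem_filter]
          refine ⟨hsfx, ?_⟩
          simp only [decide_eq_true_eq]
          exact ⟨pvTakeLtTake cs (by omega) (by omega), pvTakeLtTake cs hLlt h2'⟩
  -- pairwise facts
  have hPWB : (pvBorders cs i).Pairwise (· < ·) :=
    List.Pairwise.sublist List.filter_sublist List.pairwise_lt_range
  have hPWR : ((pvBorders cs i).map (fun L => cs.take L)).Pairwise (· < ·) := by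
    rw [List.pairwise_map]
    refine List.Pairwise.imp_of_mem ?_ hPWB
    intro a b ha hb hab
    exact pvTakeLtTake cs hab (le_trans ((pvMemBorders cs i b).mp hb).1 h2')
  have hndS := pvNodupSfx cs h2'
  have hndX2 : (pvX2 cs i).Nodup := by rw [pvX2]; exact hndS.filter _
  have hndM : (pvM cs i).Nodup := by
    rw [pvM]
    exact (PySem.List.sorted_perm _ _ _).nodup_iff.mpr (hndS.filter _)
  have hPWbase : (([] : List Char) :: (pvX2 cs i ++ pvM cs i ++ [cs.take i])).Pairwise (· < ·) := by
    rw [List.pairwise_cons]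
    constructor
    · intro b hb
      have hbne : b ≠ [] := by
        rcases List.mem_append.mp hb with hb | hb
        · rcases List.mem_append.mp hb with hb | hb
          · exact hne _ (pvMemX2 cs i hb).1
          · exact hne _ (pvMemM cs i hb).1
        · rw [List.mem_singleton.mp hb]
          intro hc
          rw [hc] at hwlen
          simp at hwlen
          omega
      cases b with
      | nil => exact absurd rfl hbne
      | cons c t => exact List.Lex.nil
    · rw [List.pairwise_append]
      refine ⟨?_, List.pairwise_singleton _ _, ?_⟩
      · rw [List.pairwise_append]
        refine ⟨?_, ?_, ?_⟩
        · have hX2le : (pvX2 cs i).Pairwise (· ≤ ·) :=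
            List.pairwise_of_forall_mem_list (fun a ha b hb =>
              le_of_eq ((pvMemX2 cs i ha).2.trans (pvMemX2 cs i hb).2.symm))
          exact (hX2le.and hndX2).imp (fun h => lt_of_le_of_ne h.1 h.2)
        · have hMle : (pvM cs i).Pairwise (· ≤ ·) := by
            rw [pvM]; exact pvSortedPairwiseCore _
          exact (hMle.and hndM).imp (fun h => lt_of_le_of_ne h.1 h.2)
        · intro a ha b hb
          rw [(pvMemX2 cs i ha).2]
          exact (pvMemM cs i hb).2.1
      · intro a ha b hb
        rw [List.mem_singleton.mp hb]
        rcases List.mem_append.mp ha with ha | ha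
        · rw [(pvMemX2 cs i ha).2]; exact hxw
        · exact (pvMemM cs i ha).2.2
  have hPWL : ((([] : List Char) :: (pvX2 cs i ++ pvM cs i ++ [cs.take i])).filter
      (fun sj => decide (sj = cs.take sj.length))).Pairwise (· < ·) :=
    List.Pairwise.sublist List.filter_sublist hPWbase
  have hndL : ((([] : List Char) :: (pvX2 cs i ++ pvM cs i ++ [cs.take i])).filter
      (fun sj => decide (sj = cs.take sj.length))).Nodup := hPWL.imp (fun h => ne_of_lt h)
  have hndR : ((pvBorders cs i).map (fun L => cs.take L)).Nodup :=
    hPWR.imp (fun h => ne_of_lt h)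
  have hperm := (List.perm_ext_iff_of_nodup hndL hndR).mpr (by
    intro a
    rw [List.mem_filter, List.mem_map]
    constructor
    · rintro ⟨hmem, hp⟩
      obtain ⟨L, hLb, hLa⟩ := hmemF a ⟨hmem, by simpa using hp⟩
      exact ⟨L, hLb, hLa⟩
    · rintro ⟨L, hLb, rfl⟩
      obtain ⟨hm, hp⟩ := hmemB L hLb
      exact ⟨hm, by simpa using hp.symm⟩)
  exact PySem.List.eq_of_perm_of_pairwise_le_of_injective (κ := List Char)
    (fun t : List Char => t) (fun a b h => h) hperm
    (hPWL.imp (fun h => le_of_lt h)) (hPWR.imp (fun h => le_of_lt h))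

theorem pvJumpA (cs : List Char) {i : Nat} (h1 : 2 ≤ i) (h2 : i < cs.length) :
    matchFAJumpA cs (([] : List Char) :: (pvX2 cs i ++ pvM cs i ++ [cs.take i])) = pvDictC cs i := by
  rw [matchFAJumpA]
  have hbody : ∀ (jump : PySem.Dict String Int) (sj : List Char),
      (if sj = PySem.List.slice cs none (some (sj.length : Int)) then
        match PySem.List.pyGet? cs (sj.length : Int) with
        | some c => jump.insert (String.mk [c]) ((sj.length : Int) + 1)
        | none => jump
       else jump)
      = (if sj = cs.take sj.length then pvStep cs jump sj.length else jump) := by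
    intro jump sj
    rw [PySem.List.slice_to cs (by positivity), Int.toNat_natCast, PySem.List.pyGet?_natCast]
    rfl
  simp only [hbody]
  rw [PySem.List.foldl_ite_eq_foldl_filter (fun sj : List Char => sj = cs.take sj.length)
        (fun jump sj => pvStep cs jump sj.length)]
  rw [pvFilterChar cs h1 h2]
  rw [List.foldl_map, pvDictC]
  apply PySem.List.foldl_congr_mem
  intro acc L hL
  have hLi : L ≤ i := ((pvMemBorders cs i L).mp hL).1
  have hlt : (cs.take L).length = L := by simp; omega
  rw [hlt]

-- A's per-state result, state i = 1
theorem pvStateA1 (cs : List Char) (h2 : 1 < cs.length) :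
    matchFAStateA cs ((1 : Nat) : Int) = pvDictC cs 1 := by
  have hx : PySem.List.slice cs (some 0) (some 1) = cs.take 1 := by
    rw [PySem.List.slice_toNat cs (by norm_num) (by norm_num)]
    norm_num
  have hsuf : (PySem.List.pyRange 0 (1 : Int) 1).map
      (fun j => PySem.List.slice cs (some j) (some (1 : Int)))
      = [cs.take 1] := by
    rw [PySem.List.pyRange_one]
    norm_num
    rw [PySem.List.slice_to cs (by norm_num)]
    norm_num
  have hsorted : PySem.List.sorted ([cs.take 1] ++ [cs.take 1]) (fun t => t) false
      = [cs.take 1, cs.take 1] := by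
    apply pvSortedEqSelfCore
    simp
  obtain ⟨c, cs', rfl⟩ : ∃ c cs', cs = c :: cs' := by
    cases cs with
    | nil => simp at h2
    | cons c cs' => exact ⟨c, cs', rfl⟩
  obtain ⟨d, t, rfl⟩ : ∃ d t, cs' = d :: t := by
    cases cs' with
    | nil => simp at h2
    | cons d t => exact ⟨d, t, rfl⟩
  rw [matchFAStateA]
  rw [show ((1 : Nat) : Int) = (1 : Int) from rfl]
  rw [hsuf, hx, hsorted]
  rw [show List.take 1 (c :: d :: t) = [c] from rfl]
  rw [PySem.List.index?_cons_self, Option.getD_some]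
  rw [show List.drop (0 + 1) [([c] : List Char), [c]] = [[c]] from rfl]
  rw [show PySem.List.slice (c :: d :: t) none (some (1 : Int)) = [c] from by
    rw [PySem.List.slice_to _ (by norm_num)]; rfl]
  rw [PySem.List.index?_cons_self, Option.getD_some]
  rw [show PySem.List.slice [([c] : List Char), [c]] (some (((0 : Nat) : Int) + 1))
      (some (((0 + 1 + 0 : Nat) : Int) + 1)) = [[c]] from by
    rw [PySem.List.slice_toNat _ (by norm_num) (by norm_num)]
    norm_num
    omega]
  rw [matchFAJumpA]
  simp only [List.foldl_cons, List.foldl_nil]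
  rw [if_pos (show ([] : List Char) = PySem.List.slice (c :: d :: t) none
      (some ((([] : List Char).length : Nat) : Int)) from by
    rw [PySem.List.slice_to _ (by norm_num)]; rfl)]
  rw [show PySem.List.pyGet? (c :: d :: t) ((([] : List Char).length : Nat) : Int) = some c from by
    rw [PySem.List.pyGet?_natCast]; rfl]
  rw [if_pos (show ([c] : List Char) = PySem.List.slice (c :: d :: t) none
      (some ((([c] : List Char).length : Nat) : Int)) from by
    rw [PySem.List.slice_to _ (by norm_num)]; rfl)]
  rw [show PySem.List.pyGet? (c :: d :: t) ((([c] : List Char).length : Nat) : Int) = some d from by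
    rw [PySem.List.pyGet?_natCast]; rfl]
  rw [pvDictC, pvBorders]
  rw [show List.range 2 = [0, 1] from rfl]
  rw [show ([0, 1] : List Nat).filter (pvBorder (c :: d :: t) 1) = [0, 1] by
    have hb0 : pvBorder (c :: d :: t) 1 0 = true := by
      rw [pvBorder]; exact decide_eq_true rfl
    have hb1 : pvBorder (c :: d :: t) 1 1 = true := by
      rw [pvBorder]; exact decide_eq_true rfl
    simp [List.filter_cons, hb0, hb1]]
  simp only [List.foldl_cons, List.foldl_nil, pvStep, List.getElem?_cons_zero,
    List.getElem?_cons_succ]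
  norm_num

-- A's per-state result
theorem pvStateA (cs : List Char) {i : Nat} (h1 : 1 ≤ i) (h2 : i < cs.length) :
    matchFAStateA cs (i : Int) = pvDictC cs i := by
  rcases eq_or_lt_of_le h1 with h1' | h12
  · rw [← h1']
    exact pvStateA1 cs (by omega)
  · have h2' : i ≤ cs.length := le_of_lt h2
    have hx : PySem.List.slice cs (some 0) (some 1) = pvXc cs := by
      rw [PySem.List.slice_toNat cs (by norm_num) (by norm_num), pvXc]
      norm_num
    have hsuf : (PySem.List.pyRange 0 (i : Int) 1).map
        (fun j => PySem.List.slice cs (some j) (some (i : Int)))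
        = pvSfx cs i := by
      rw [PySem.List.pyRange_one]
      rw [show ((i : Int) - 0) = ((i : Nat) : Int) by ring]
      rw [Int.toNat_natCast, List.map_map, pvSfx]
      apply List.map_congr_left
      intro j hj
      have hj' : j < i := List.mem_range.mp hj
      simp only [Function.comp_apply]
      rw [show ((0 : Int) + (j : Int)) = ((j : Nat) : Int) by ring]
      rw [PySem.List.slice_toNat cs (by positivity) (by positivity),
        Int.toNat_natCast, Int.toNat_natCast, List.drop_take]
    have hw : PySem.List.slice cs none (some (i : Int)) = cs.take i := by
      rw [PySem.List.slice_to cs (by positivity), Int.toNat_natCast]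
    rw [matchFAStateA]
    simp only [hsuf, hx, hw]
    rw [pvSortedEqSL0 cs h12 h2', pvBegSpec cs h12 h2', Option.getD_some,
      pvThisSpec cs h12 h2', Option.getD_some, pvSliceSpec cs h12 h2']
    exact pvJumpA cs h12 h2

-- B's per-state result
theorem pvStateB (cs : List Char) {i : Nat} (h2 : i < cs.length) :
    matchFAStateB cs (i : Int) = pvDictC cs i := by
  rw [matchFAStateB]
  have hr : PySem.List.pyRange 0 ((i : Int) + 1) 1
      = List.map (fun k : Nat => (k : Int)) (List.range (i + 1)) := by
    rw [PySem.List.pyRange_one]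
    rw [show ((i : Int) + 1 - 0) = ((i + 1 : Nat) : Int) by push_cast; ring]
    rw [Int.toNat_natCast]
    apply List.map_congr_left
    intro k _
    ring
  rw [hr, List.foldl_map]
  refine Eq.trans (PySem.List.foldl_congr_mem _ _
    (fun acc k => if pvBorder cs i k = true then pvStep cs acc k else acc) _ ?_) ?_
  · intro acc k hk
    have hk' : k ≤ i := by have := List.mem_range.mp hk; omega
    simp only []
    have hs1 : PySem.List.slice cs none (some (k : Int)) = cs.take k := by
      rw [PySem.List.slice_to cs (by positivity), Int.toNat_natCast]
    have hs2 : PySem.List.slice cs (some ((i : Int) - (k : Int))) (some (i : Int))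
        = (cs.take i).drop (i - k) := by
      rw [show ((i : Int) - (k : Int)) = ((i - k : Nat) : Int) by
        rw [Nat.cast_sub hk']]
      rw [PySem.List.slice_toNat cs (by positivity) (by positivity),
        Int.toNat_natCast, Int.toNat_natCast, List.drop_take]
    rw [hs1, hs2, PySem.List.pyGet?_natCast]
    have hcond : ((k : Int) = 0 ∨ cs.take k = (cs.take i).drop (i - k))
        ↔ (pvBorder cs i k = true) := by
      rw [pvBorder, decide_eq_true_eq]
      constructor
      · rintro (h0 | h)
        · have hk0 : k = 0 := by exact_mod_cast h0
          subst hk0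
          simp [List.drop_take]
        · exact h
      · intro h
        exact Or.inr h
    exact if_congr hcond rfl rfl
  · rw [PySem.List.foldl_if_eq_foldl_filter (pvBorder cs i) (pvStep cs), pvDictC, pvBorders]


theorem pvState0 (cs : List Char) (h : 0 < cs.length) :
    pvDictC cs 0 = PySem.Dict.empty.insert (String.mk [cs.headI]) 1 := by
  obtain ⟨c, cs', rfl⟩ : ∃ c cs', cs = c :: cs' := by
    cases cs with
    | nil => simp at h
    | cons c cs' => exact ⟨c, cs', rfl⟩
  rw [pvDictC, pvBorders]
  rw [show List.range 1 = [0] from rfl]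
  rw [show ([0] : List Nat).filter (pvBorder (c :: cs') 0) = [0] by
    simp [List.filter_cons, pvBorder]]
  simp only [List.foldl_cons, List.foldl_nil, pvStep, List.getElem?_cons_zero]
  norm_num

-- ===== VERDICT (by name: the statement is the Claim_ definition above) =====
theorem match_FA_def_spec : Claim_equal_match_FA_def := by
  intro s _hdom hpre
  unfold Spec_match_FA_def
  rw [match_FA_def, match_FA_def_alt]
  have hnil : s.toList ≠ [] := fun h => hpre (String.toList_inj.mp h)
  have hlen : s.toList.length ≠ 0 := fun h => hnil (List.eq_nil_of_length_eq_zero h)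
  rw [if_neg hlen, if_neg hlen]
  have hpos : (0 : Int) < (s.toList.length : Int) := by
    have := Nat.pos_of_ne_zero hlen
    exact_mod_cast this
  rw [PySem.List.foldl_append_singleton_eq_map (matchFAStateA s.toList),
      PySem.List.foldl_append_singleton_eq_map (matchFAStateB s.toList),
      PySem.List.pyRange_one_cons hpos]
  rw [show (0 : Int) + 1 = 1 by ring]
  rw [List.map_cons, List.nil_append, List.singleton_append]
  have hB0 : matchFAStateB s.toList 0 = PySem.Dict.empty.insert (String.mk [s.toList.headI]) 1 := by
    rw [show (0 : Int) = ((0 : Nat) : Int) by norm_num]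
    rw [pvStateB s.toList (Nat.pos_of_ne_zero hlen)]
    exact pvState0 s.toList (Nat.pos_of_ne_zero hlen)
  rw [hB0]
  have hmap : (PySem.List.pyRange 1 (s.toList.length : Int) 1).map (matchFAStateA s.toList)
      = (PySem.List.pyRange 1 (s.toList.length : Int) 1).map (matchFAStateB s.toList) := by
    apply List.map_congr_left
    intro x hx
    obtain ⟨hx1, hx2⟩ := PySem.List.mem_pyRange_one.mp hx
    have hx0 : 0 ≤ x := by omega
    have hxe : x = ((x.toNat : Nat) : Int) := (Int.toNat_of_nonneg hx0).symm
    have hk1 : 1 ≤ x.toNat := by omega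
    have hk2 : x.toNat < s.toList.length := by omega
    rw [hxe, pvStateA s.toList hk1 hk2, pvStateB s.toList hk2]
  rw [hmap]
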